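-- pv_equiv track=rewrite | github.com/eriksylvan/AdventOfCode2019 | day_17.py | decodeMap
-- ===== SOURCE A (Python) =====
-- def decodeMap(mapList):
--     ret = []
--     row = ''
--     for ascii in mapList:
--         if str(ascii) == '10':
--             ret.append(row)
--             row = ''
--         else:
--             row += chr(ascii)
--     return ret
-- ===== SOURCE B (Python) =====
-- def decodeMap(mapList):
--     # Build the whole text once, split on newlines, drop the trailing
--     # (unterminated) segment -- A only emits rows terminated by '\n'.
--     return ''.join(chr(a) for a in mapList).split('\n')[:-1]
-- ===== Notes on version B (the rewrite author's own statement) =====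
-- stated objective: simpler
-- what changed: Replaces the interleaved accumulate-and-flush loop (append row on code 10, else extend the current row) with a build-then-split decomposition: join all characters into one string, split on '\n', and drop the final unterminated segment.
-- outside the precondition, e.g. on decodeMap([65, 10, 55296]): A returns ['A'], B returns ['A']
import Mathlib
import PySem

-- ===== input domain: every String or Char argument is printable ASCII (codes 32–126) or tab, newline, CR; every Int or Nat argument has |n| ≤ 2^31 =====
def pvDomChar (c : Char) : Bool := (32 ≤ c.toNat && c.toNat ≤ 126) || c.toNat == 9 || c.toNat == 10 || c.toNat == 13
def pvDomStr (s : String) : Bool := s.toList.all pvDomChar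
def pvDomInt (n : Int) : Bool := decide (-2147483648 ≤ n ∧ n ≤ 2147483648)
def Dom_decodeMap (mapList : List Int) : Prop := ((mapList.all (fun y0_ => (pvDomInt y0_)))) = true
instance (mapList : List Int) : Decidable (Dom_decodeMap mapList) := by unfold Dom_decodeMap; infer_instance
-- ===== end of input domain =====

-- B replaces A's accumulate-and-flush loop by a build-then-split decomposition (join all chars, split on '\n', drop the trailing unterminated segment); objective: simpler.


-- ===== PORT A =====
-- Python strings are ported as List Char (PySem.Chars) while accumulating; a finished row
-- becomes a String via String.ofList. chr(ascii) is Char.ofNat ascii.toNat — exact inside Pre_.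
def decodeMap (mapList : List Int) : List String :=
  (mapList.foldl
    (fun (st : List String × List Char) ascii =>
      if PySem.Int.toStr ascii = "10" then (st.1 ++ [String.ofList st.2], ([] : List Char))
      else (st.1, st.2 ++ [Char.ofNat ascii.toNat]))
    (([] : List String), ([] : List Char))).1

-- ===== PORT B =====
-- ''.join(chr(a) for a in mapList).split('\n')[:-1]
def decodeMap_alt (mapList : List Int) : List String :=
  PySem.List.slice
    ((PySem.Chars.splitOn (mapList.map (fun a => Char.ofNat a.toNat)) ['\n']).map String.ofList)
    none (some (-1))

-- ===== PRECONDITION & SPEC =====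
-- Pre_ excludes elements that are not valid chr() arguments (there chr, hence both A and B,
-- raises ValueError) and surrogate code points 0xD800–0xDFFF, on which A returns a
-- lone-surrogate string that is not representable as a Lean String/Char.
def Pre_decodeMap (mapList : List Int) : Prop :=
  ∀ a ∈ mapList, 0 ≤ a ∧ a < 1114112 ∧ (a < 55296 ∨ 57343 < a)
instance (mapList : List Int) : Decidable (Pre_decodeMap mapList) := by
  unfold Pre_decodeMap; infer_instance
def pvWitness_decodeMap : List Int := [72, 105, 10, 33]
def Spec_decodeMap (mapList : List Int) (out : List String) : Prop := out = decodeMap_alt mapList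
instance (mapList : List Int) (out : List String) : Decidable (Spec_decodeMap mapList out) := by unfold Spec_decodeMap; infer_instance

-- ===== CLAIM (what is proved, stated in full; the proofs are below) =====
def Claim_equal_decodeMap : Prop := ∀ (mapList : List Int), Dom_decodeMap mapList → Pre_decodeMap mapList → Spec_decodeMap mapList (decodeMap mapList)

-- ===== LEMMAS AND PROOFS =====

-- Reference splitter: splitNl pre l = the '\n'-separated pieces of pre ++ l
-- (pre = the partial piece accumulated so far).
def splitNl (pre : List Char) : List Char → List (List Char)
  | [] => [pre]
  | c :: rest => if c = '\n' then pre :: splitNl [] rest else splitNl (pre ++ [c]) rest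

theorem splitNl_ne_nil (l : List Char) (pre : List Char) : splitNl pre l ≠ [] := by
  induction l generalizing pre with
  | nil => simp [splitNl]
  | cons c rest ih =>
    simp only [splitNl]
    split_ifs
    · simp
    · exact ih _

theorem go_eq_splitNl (fuel : Nat) (l cur : List Char) (acc : List (List Char))
    (h : l.length < fuel) :
    PySem.Chars.splitOn.go ['\n'] fuel l cur acc = acc.reverse ++ splitNl cur.reverse l := by
  induction fuel generalizing l cur acc with
  | zero => omega
  | succ n ih =>
    cases l with
    | nil => simp [PySem.Chars.splitOn.go, splitNl]
    | cons c rest =>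
      by_cases hc : c = '\n'
      · subst hc
        rw [show PySem.Chars.splitOn.go ['\n'] (n+1) ('\n' :: rest) cur acc
              = PySem.Chars.splitOn.go ['\n'] n rest [] (cur.reverse :: acc) by
            simp [PySem.Chars.splitOn.go, List.isPrefixOf]]
        rw [ih rest [] (cur.reverse :: acc) (by simpa using h)]
        simp [splitNl]
      · rw [show PySem.Chars.splitOn.go ['\n'] (n+1) (c :: rest) cur acc
              = PySem.Chars.splitOn.go ['\n'] n rest (c :: cur) acc by
            simp [PySem.Chars.splitOn.go, List.isPrefixOf, Ne.symm hc]]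
        rw [ih rest (c :: cur) acc (by simpa using h)]
        simp [splitNl, hc]

theorem splitOn_newline_eq (s : List Char) :
    PySem.Chars.splitOn s ['\n'] = splitNl [] s := by
  show PySem.Chars.splitOn.go ['\n'] (s.length + 1) s [] [] = _
  rw [go_eq_splitNl _ _ _ _ (by omega)]
  simp

-- str(a) == '10' fires exactly on a = 10.
theorem toStr_eq_ten_iff (a : Int) : (PySem.Int.toStr a = "10") ↔ a = 10 := by
  constructor
  · intro h
    have hchars : PySem.Int.toChars a = ['1', '0'] := by
      have := congrArg String.toList h
      rwa [PySem.Int.toList_toStr] at this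
    unfold PySem.Int.toChars at hchars
    split_ifs at hchars with hneg
    · simp at hchars
    · push Not at hneg
      have hlt : a.toNat < 100 := by
        by_contra hge
        push Not at hge
        have h2 : ¬ (Nat.toDigits 10 a.toNat).length ≤ 2 := by
          rw [Nat.length_toDigits_le_iff] <;> omega
        rw [hchars] at h2
        simp at h2
      have hten : a.toNat = 10 := by
        have : ∀ n : Fin 100, Nat.toDigits 10 n.val = ['1', '0'] → n.val = 10 := by decide
        exact this ⟨a.toNat, hlt⟩ hchars
      omega
  · intro h; subst h; decide

theorem chr_eq_newline_iff (a : Int) (h0 : 0 ≤ a) (h1 : a < 1114112)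
    (h2 : a < 55296 ∨ 57343 < a) : (Char.ofNat a.toNat = '\n') ↔ a = 10 := by
  have hvalid : Nat.isValidChar a.toNat := by
    rcases h2 with h2 | h2
    · exact Or.inl (by omega)
    · exact Or.inr ⟨by omega, by omega⟩
  constructor
  · intro h
    have := congrArg Char.toNat h
    rw [show (Char.ofNat a.toNat).toNat = a.toNat by simp [Char.ofNat, hvalid]] at this
    simp [Char.toNat] at this
    omega
  · intro h; subst h; decide

-- Loop invariant: A's fold from state (ret, row) returns ret ++ the finished rows of row ++ l.
theorem foldA_eq (l : List Int) (ret : List String) (row : List Char)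
    (hp : ∀ a ∈ l, 0 ≤ a ∧ a < 1114112 ∧ (a < 55296 ∨ 57343 < a)) :
    (l.foldl
      (fun (st : List String × List Char) ascii =>
        if PySem.Int.toStr ascii = "10" then (st.1 ++ [String.ofList st.2], ([] : List Char))
        else (st.1, st.2 ++ [Char.ofNat ascii.toNat]))
      (ret, row)).1
    = ret ++ ((splitNl row (l.map (fun a => Char.ofNat a.toNat))).map String.ofList).dropLast := by
  induction l generalizing ret row with
  | nil => simp [splitNl]
  | cons a l ih =>
    obtain ⟨h0, h1, h2⟩ := hp a (by simp)
    have hrest : ∀ b ∈ l, 0 ≤ b ∧ b < 1114112 ∧ (b < 55296 ∨ 57343 < b) := by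
      intro b hb; exact hp b (by simp [hb])
    by_cases h10 : a = 10
    · subst h10
      rw [List.foldl_cons, if_pos (by decide), ih _ _ hrest]
      simp only [List.map_cons]
      rw [show Char.ofNat ((10 : Int)).toNat = '\n' from by decide]
      rw [show splitNl row ('\n' :: l.map (fun a => Char.ofNat a.toNat))
            = row :: splitNl [] (l.map (fun a => Char.ofNat a.toNat)) from by simp [splitNl]]
      rw [List.map_cons, List.dropLast_cons_of_ne_nil (by
        simp only [ne_eq, List.map_eq_nil_iff]
        exact splitNl_ne_nil _ _)]
      simp
    · rw [List.foldl_cons, if_neg (by rw [toStr_eq_ten_iff]; exact h10), ih _ _ hrest]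
      have hne : Char.ofNat a.toNat ≠ '\n' := by
        rw [ne_eq, chr_eq_newline_iff a h0 h1 h2]; exact h10
      simp only [List.map_cons, splitNl, if_neg hne]

-- ===== VERDICT (by name: the statement is the Claim_ definition above) =====
theorem decodeMap_spec : Claim_equal_decodeMap := by
  intro mapList _hdom hpre
  unfold Spec_decodeMap decodeMap decodeMap_alt
  rw [foldA_eq mapList [] [] hpre, splitOn_newline_eq, PySem.List.slice_to_neg_one]
  simp
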